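-- pv_equiv track=rewrite | github.com/ninjra/statistics_harness | plugins/analysis_process_sequence_bottlenecks/plugin.py | _candidate_columns
-- ===== SOURCE A (Python) =====
-- def _candidate_columns(
--     preferred: str | None,
--     columns: list[str],
--     role_by_name: dict[str, str],
--     roles: set[str],
--     patterns: list[str],
--     lower_names: dict[str, str],
--     exclude: set[str],
-- ) -> list[str]:
--     seen: set[str] = set()
--     candidates: list[str] = []
--     if preferred and preferred in columns and preferred not in exclude and preferred not in seen:
--         candidates.append(preferred)
--         seen.add(preferred)
--     for col in columns:
--         if col in exclude or col in seen:
--             continue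
--         if role_by_name.get(col) in roles:
--             candidates.append(col)
--             seen.add(col)
--     for col in columns:
--         if col in exclude or col in seen:
--             continue
--         name = lower_names[col]
--         if any(pattern in name for pattern in patterns):
--             candidates.append(col)
--             seen.add(col)
--     return candidates
-- ===== SOURCE B (Python) =====
-- def _candidate_columns(
--     preferred,
--     columns,
--     role_by_name,
--     roles,
--     patterns,
--     lower_names,
--     exclude,
-- ):
--     head = []
--     if preferred and preferred in columns and preferred not in exclude:
--         head.append(preferred)
--     seen = set(head)
--     role_bucket = []
--     pattern_bucket = []
--     for col in columns:
--         if col in exclude or col in seen: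
--             continue
--         seen.add(col)
--         if role_by_name.get(col) in roles:
--             role_bucket.append(col)
--         elif any(pattern in lower_names[col] for pattern in patterns):
--             pattern_bucket.append(col)
--     return head + role_bucket + pattern_bucket
-- ===== Notes on version B (the rewrite author's own statement) =====
-- stated objective: alternative
-- what changed: A makes two sequential scans over columns (a role pass, then a pattern pass) sharing one growing candidates list and seen set; B makes a single pass that classifies each column into a role bucket or a pattern bucket and returns head + role_bucket + pattern_bucket.
import Mathlib
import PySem

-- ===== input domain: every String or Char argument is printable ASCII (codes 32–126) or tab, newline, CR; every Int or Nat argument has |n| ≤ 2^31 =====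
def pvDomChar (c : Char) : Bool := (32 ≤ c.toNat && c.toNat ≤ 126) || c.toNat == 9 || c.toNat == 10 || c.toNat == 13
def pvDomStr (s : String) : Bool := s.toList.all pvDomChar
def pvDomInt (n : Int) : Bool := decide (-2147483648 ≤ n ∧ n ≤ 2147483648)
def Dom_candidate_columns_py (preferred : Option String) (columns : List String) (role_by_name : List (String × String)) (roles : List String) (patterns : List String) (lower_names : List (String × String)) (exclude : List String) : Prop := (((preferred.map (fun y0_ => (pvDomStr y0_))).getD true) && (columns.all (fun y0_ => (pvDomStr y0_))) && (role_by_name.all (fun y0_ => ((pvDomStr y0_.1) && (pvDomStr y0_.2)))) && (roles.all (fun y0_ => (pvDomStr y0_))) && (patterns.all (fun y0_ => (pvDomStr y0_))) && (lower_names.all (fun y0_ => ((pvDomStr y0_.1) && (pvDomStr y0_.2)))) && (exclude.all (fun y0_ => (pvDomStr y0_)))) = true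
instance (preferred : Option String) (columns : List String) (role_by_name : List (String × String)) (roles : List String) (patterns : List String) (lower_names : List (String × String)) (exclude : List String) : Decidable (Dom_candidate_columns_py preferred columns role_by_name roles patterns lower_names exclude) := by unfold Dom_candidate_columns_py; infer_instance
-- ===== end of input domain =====

-- B replaces A's two sequential scans over `columns` by a single bucketed pass (role bucket /
-- pattern bucket, concatenated after the preferred head); alternative decomposition, same cost.


-- ===== PORT A =====
-- `role_by_name.get(col) in roles` (None is never in a set of strings)
def pvRoleHit (role_by_name : List (String × String)) (roles : List String) (col : String) : Bool :=
  match role_by_name.lookup col with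
  | some r => roles.contains r
  | none => false

-- the `if preferred and …` block: resulting (candidates, seen)
def pvInitA (preferred : Option String) (columns : List String) (exclude : List String) :
    List String × PySem.Set String :=
  let seen : PySem.Set String := PySem.Set.empty
  let candidates : List String := []
  match preferred with
  | some p =>
      if !(p == "") && columns.contains p && !(exclude.contains p) && !(PySem.Set.contains seen p)
      then (candidates ++ [p], PySem.Set.add seen p) else (candidates, seen)
  | none => (candidates, seen)

-- body of A's first loop (role pass); state = (candidates, seen)
def pvStepRole (role_by_name : List (String × String)) (roles : List String)
    (exclude : List String) (st : List String × PySem.Set String) (col : String) :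
    List String × PySem.Set String :=
  if exclude.contains col || PySem.Set.contains st.2 col then st
  else if pvRoleHit role_by_name roles col then (st.1 ++ [col], PySem.Set.add st.2 col)
  else st

-- body of A's second loop (pattern pass); `lower_names[col]` raises KeyError on a missing key
-- (the `none` branch), excluded by Pre_
def pvStepPat (lower_names : List (String × String)) (patterns : List String)
    (exclude : List String) (st : List String × PySem.Set String) (col : String) :
    List String × PySem.Set String :=
  if exclude.contains col || PySem.Set.contains st.2 col then st
  else match lower_names.lookup col with
    | some name =>
        if patterns.any (fun pattern => PySem.Str.isIn pattern name)
        then (st.1 ++ [col], PySem.Set.add st.2 col) else st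
    | none => st

def candidate_columns_py (preferred : Option String) (columns : List String) (role_by_name : List (String × String)) (roles : List String) (patterns : List String) (lower_names : List (String × String)) (exclude : List String) : List String :=
  let st0 := pvInitA preferred columns exclude
  let st1 := columns.foldl (pvStepRole role_by_name roles exclude) st0
  let st2 := columns.foldl (pvStepPat lower_names patterns exclude) st1
  st2.1

-- ===== PORT B =====
-- the `head` list of Source B
def pvHeadB (preferred : Option String) (columns : List String) (exclude : List String) :
    List String :=
  match preferred with
  | some p =>
      if !(p == "") && columns.contains p && !(exclude.contains p) then [p] else []
  | none => []

-- body of B's single loop; state = (role_bucket, pattern_bucket, seen).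
-- `any(pattern in lower_names[col] for pattern in patterns)`: the KeyError on a missing key
-- (excluded by Pre_) is the `none` of `Option.any`, which yields `false` here
def pvStepB (role_by_name : List (String × String)) (roles : List String)
    (patterns : List String) (lower_names : List (String × String)) (exclude : List String)
    (st : List String × List String × PySem.Set String) (col : String) :
    List String × List String × PySem.Set String :=
  if exclude.contains col || PySem.Set.contains st.2.2 col then st
  else
    let seen' := PySem.Set.add st.2.2 col
    if pvRoleHit role_by_name roles col then (st.1 ++ [col], st.2.1, seen')
    else if patterns.any (fun pattern =>
            (lower_names.lookup col).any (fun name => PySem.Str.isIn pattern name))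
    then (st.1, st.2.1 ++ [col], seen')
    else (st.1, st.2.1, seen')

def candidate_columns_py_alt (preferred : Option String) (columns : List String) (role_by_name : List (String × String)) (roles : List String) (patterns : List String) (lower_names : List (String × String)) (exclude : List String) : List String :=
  let head := pvHeadB preferred columns exclude
  let stF := columns.foldl (pvStepB role_by_name roles patterns lower_names exclude)
    ([], [], PySem.Set.ofList head)
  head ++ stF.1 ++ stF.2.1

-- ===== PRECONDITION & SPEC =====
-- Pre_ excludes exactly the inputs on which A raises KeyError: some non-excluded column has no
-- entry in lower_names and is caught neither by the preferred head nor by the role pass.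
def Pre_candidate_columns_py (preferred : Option String) (columns : List String) (role_by_name : List (String × String)) (roles : List String) (patterns : List String) (lower_names : List (String × String)) (exclude : List String) : Prop :=
  ∀ c ∈ columns, c ∉ exclude →
    ((lower_names.lookup c).isSome = true ∨ pvRoleHit role_by_name roles c = true ∨
      (preferred = some c ∧ c ≠ ""))
instance (preferred : Option String) (columns : List String) (role_by_name : List (String × String)) (roles : List String) (patterns : List String) (lower_names : List (String × String)) (exclude : List String) : Decidable (Pre_candidate_columns_py preferred columns role_by_name roles patterns lower_names exclude) := by unfold Pre_candidate_columns_py; infer_instance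

def pvWitness_candidate_columns_py : Option String × List String × (List (String × String)) × List String × List String × (List (String × String)) × List String :=
  (some "a", ["a", "b"], [("b", "t")], ["t"], ["b"], [("b", "beta")], ["c"])

def Spec_candidate_columns_py (preferred : Option String) (columns : List String) (role_by_name : List (String × String)) (roles : List String) (patterns : List String) (lower_names : List (String × String)) (exclude : List String) (out : List String) : Prop := out = candidate_columns_py_alt preferred columns role_by_name roles patterns lower_names exclude
instance (preferred : Option String) (columns : List String) (role_by_name : List (String × String)) (roles : List String) (patterns : List String) (lower_names : List (String × String)) (exclude : List String) (out : List String) : Decidable (Spec_candidate_columns_py preferred columns role_by_name roles patterns lower_names exclude out) := by unfold Spec_candidate_columns_py; infer_instance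

-- ===== CLAIM (what is proved, stated in full; the proofs are below) =====
def Claim_equal_candidate_columns_py : Prop := ∀ (preferred : Option String) (columns : List String) (role_by_name : List (String × String)) (roles : List String) (patterns : List String) (lower_names : List (String × String)) (exclude : List String), Dom_candidate_columns_py preferred columns role_by_name roles patterns lower_names exclude → Pre_candidate_columns_py preferred columns role_by_name roles patterns lower_names exclude → Spec_candidate_columns_py preferred columns role_by_name roles patterns lower_names exclude (candidate_columns_py preferred columns role_by_name roles patterns lower_names exclude)

-- ===== LEMMAS AND PROOFS =====

-- the per-column decisions of the three loops, as functions of the column alone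
def pvPredRole (role_by_name : List (String × String)) (roles exclude : List String)
    (c : String) : Bool :=
  !exclude.contains c && pvRoleHit role_by_name roles c

def pvPredPatA (lower_names : List (String × String)) (patterns exclude : List String)
    (c : String) : Bool :=
  !exclude.contains c && (List.lookup c lower_names).any
    (fun name => patterns.any (fun pattern => PySem.Str.isIn pattern name))

def pvPredPatB (role_by_name : List (String × String)) (roles patterns : List String)
    (lower_names : List (String × String)) (exclude : List String) (c : String) : Bool :=
  !exclude.contains c && !pvRoleHit role_by_name roles c &&
    patterns.any (fun pattern =>
      (List.lookup c lower_names).any (fun name => PySem.Str.isIn pattern name))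

-- first-occurrence selection: the common shape of all three loops' appended output
def pvPick (p : String → Bool) (seen : PySem.Set String) : List String → List String
  | [] => []
  | c :: cs =>
      if PySem.Set.contains seen c then pvPick p seen cs
      else if p c then c :: pvPick p (PySem.Set.add seen c) cs
      else pvPick p seen cs

theorem pvPick_skip (p : String → Bool) (s : PySem.Set String) (c : String) (cs : List String)
    (h : ¬(c ∉ s ∧ p c = true)) : pvPick p s (c :: cs) = pvPick p s cs := by
  simp only [pvPick, PySem.Set.contains_eq_listContains, List.contains_eq_mem]
  by_cases h1 : c ∈ s
  · simp [h1]
  · have h2 : p c = false := Bool.eq_false_iff.mpr (fun h' => h ⟨h1, h'⟩)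
    simp [h1, h2]

theorem pvPick_take (p : String → Bool) (s : PySem.Set String) (c : String) (cs : List String)
    (h1 : c ∉ s) (h2 : p c = true) :
    pvPick p s (c :: cs) = c :: pvPick p (PySem.Set.add s c) cs := by
  simp [pvPick, PySem.Set.contains_eq_listContains, List.contains_eq_mem, h1, h2]

theorem pvPick_ext (p q : String → Bool) (cs : List String) (s t : PySem.Set String)
    (h : ∀ d ∈ cs, ((d ∉ s ∧ p d = true) ↔ (d ∉ t ∧ q d = true))) :
    pvPick p s cs = pvPick q t cs := by
  induction cs generalizing s t with
  | nil => rfl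
  | cons c cs ih =>
      have hc := h c (by simp)
      have htail : ∀ d ∈ cs, ((d ∉ s ∧ p d = true) ↔ (d ∉ t ∧ q d = true)) :=
        fun d hd => h d (by simp [hd])
      by_cases hcp : c ∉ s ∧ p c = true
      · obtain ⟨hs1, hp1⟩ := hcp
        obtain ⟨ht1, hq1⟩ := hc.mp ⟨hs1, hp1⟩
        rw [pvPick_take p s c cs hs1 hp1, pvPick_take q t c cs ht1 hq1]
        refine congrArg _ (ih _ _ fun d hd => ?_)
        simp only [PySem.Set.mem_add]
        by_cases hdc : d = c
        · subst hdc
          constructor <;> rintro ⟨h1, -⟩ <;> exact absurd (Or.inr rfl) h1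
        · constructor <;> rintro ⟨h1, h2⟩
          · obtain ⟨h3, h4⟩ := (htail d hd).mp ⟨fun hm => h1 (Or.inl hm), h2⟩
            exact ⟨fun hm => hm.elim h3 hdc, h4⟩
          · obtain ⟨h3, h4⟩ := (htail d hd).mpr ⟨fun hm => h1 (Or.inl hm), h2⟩
            exact ⟨fun hm => hm.elim h3 hdc, h4⟩
      · have hcq : ¬(c ∉ t ∧ q c = true) := fun h' => hcp (hc.mpr h')
        rw [pvPick_skip p s c cs hcp, pvPick_skip q t c cs hcq]
        exact ih s t htail

theorem pvPick_add_of_false (p : String → Bool) (cs : List String) (s : PySem.Set String)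
    (c : String) (hp : p c = false) : pvPick p (PySem.Set.add s c) cs = pvPick p s cs := by
  refine pvPick_ext p p cs _ s (fun d hd => ?_)
  simp only [PySem.Set.mem_add]
  by_cases hdc : d = c
  · subst hdc
    constructor
    · rintro ⟨h1, -⟩; exact absurd (Or.inr rfl) h1
    · rintro ⟨-, h2⟩; exact absurd h2 (by simp [hp])
  · simp [hdc]

-- characterisation of A's role pass: the appended output and the resulting seen set
theorem pvRole_char (role_by_name : List (String × String)) (roles exclude : List String)
    (cs : List String) (st : List String × PySem.Set String) :
    (cs.foldl (pvStepRole role_by_name roles exclude) st).1 =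
      st.1 ++ pvPick (pvPredRole role_by_name roles exclude) st.2 cs ∧
    ∀ d, (d ∈ (cs.foldl (pvStepRole role_by_name roles exclude) st).2 ↔
      (d ∈ st.2 ∨ (d ∈ cs ∧ pvPredRole role_by_name roles exclude d = true))) := by
  induction cs generalizing st with
  | nil => simp [pvPick]
  | cons c cs ih =>
      simp only [List.foldl_cons]
      by_cases hex : c ∈ exclude
      · have hexb : exclude.contains c = true := by simpa using hex
        have hpred : pvPredRole role_by_name roles exclude c = false := by
          unfold pvPredRole; rw [hexb]; rfl
        have hstep : pvStepRole role_by_name roles exclude st c = st := by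
          unfold pvStepRole
          rw [if_pos (show (exclude.contains c || PySem.Set.contains st.2 c) = true by
            rw [hexb]; rfl)]
        rw [hstep, pvPick_skip _ _ _ _ (by simp [hpred])]
        refine ⟨(ih st).1, fun d => ((ih st).2 d).trans ?_⟩
        by_cases hdc : d = c
        · subst hdc; simp [hpred]
        · simp [List.mem_cons, hdc]
      · have hexb : exclude.contains c = false := by simpa using hex
        by_cases hseen : c ∈ st.2
        · have hseenb : PySem.Set.contains st.2 c = true := by simpa using hseen
          have hstep : pvStepRole role_by_name roles exclude st c = st := by
            unfold pvStepRole
            rw [if_pos (show (exclude.contains c || PySem.Set.contains st.2 c) = true by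
              rw [hseenb, Bool.or_true])]
          rw [hstep, pvPick_skip _ _ _ _ (by simp [hseen])]
          refine ⟨(ih st).1, fun d => ((ih st).2 d).trans ?_⟩
          by_cases hdc : d = c
          · subst hdc; simp [hseen]
          · simp [List.mem_cons, hdc]
        · have hseenb : PySem.Set.contains st.2 c = false := by simpa using hseen
          have hcn : ¬((exclude.contains c || PySem.Set.contains st.2 c) = true) := by
            rw [hexb, hseenb]; simp
          by_cases hrole : pvRoleHit role_by_name roles c = true
          · have hpred : pvPredRole role_by_name roles exclude c = true := by
              unfold pvPredRole; rw [hexb, hrole]; rfl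
            have hstep : pvStepRole role_by_name roles exclude st c =
                (st.1 ++ [c], PySem.Set.add st.2 c) := by
              unfold pvStepRole
              rw [if_neg hcn, if_pos hrole]
            rw [hstep, pvPick_take _ _ _ _ hseen hpred]
            constructor
            · rw [(ih _).1]; simp
            · intro d
              rw [(ih _).2 d]
              simp only [PySem.Set.mem_add, List.mem_cons]
              by_cases hdc : d = c
              · subst hdc; simp [hpred]
              · simp [hdc]
          · have hrole' : pvRoleHit role_by_name roles c = false :=
              Bool.eq_false_iff.mpr hrole
            have hpred : pvPredRole role_by_name roles exclude c = false := by
              unfold pvPredRole; rw [hexb, hrole']; rfl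
            have hstep : pvStepRole role_by_name roles exclude st c = st := by
              unfold pvStepRole
              rw [if_neg hcn, if_neg hrole]
            rw [hstep, pvPick_skip _ _ _ _ (by simp [hpred])]
            refine ⟨(ih st).1, fun d => ((ih st).2 d).trans ?_⟩
            by_cases hdc : d = c
            · subst hdc; simp [hpred]
            · simp [List.mem_cons, hdc]

-- characterisation of A's pattern pass (candidates component)
theorem pvPat_char (lower_names : List (String × String)) (patterns exclude : List String)
    (cs : List String) (st : List String × PySem.Set String) :
    (cs.foldl (pvStepPat lower_names patterns exclude) st).1 =
      st.1 ++ pvPick (pvPredPatA lower_names patterns exclude) st.2 cs := by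
  induction cs generalizing st with
  | nil => simp [pvPick]
  | cons c cs ih =>
      simp only [List.foldl_cons]
      by_cases hex : c ∈ exclude
      · have hexb : exclude.contains c = true := by simpa using hex
        have hpred : pvPredPatA lower_names patterns exclude c = false := by
          unfold pvPredPatA; rw [hexb]; rfl
        have hstep : pvStepPat lower_names patterns exclude st c = st := by
          unfold pvStepPat
          rw [if_pos (show (exclude.contains c || PySem.Set.contains st.2 c) = true by
            rw [hexb]; rfl)]
        rw [hstep, pvPick_skip _ _ _ _ (by simp [hpred]), ih st]
      · have hexb : exclude.contains c = false := by simpa using hex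
        by_cases hseen : c ∈ st.2
        · have hseenb : PySem.Set.contains st.2 c = true := by simpa using hseen
          have hstep : pvStepPat lower_names patterns exclude st c = st := by
            unfold pvStepPat
            rw [if_pos (show (exclude.contains c || PySem.Set.contains st.2 c) = true by
              rw [hseenb, Bool.or_true])]
          rw [hstep, pvPick_skip _ _ _ _ (by simp [hseen]), ih st]
        · have hseenb : PySem.Set.contains st.2 c = false := by simpa using hseen
          have hcn : ¬((exclude.contains c || PySem.Set.contains st.2 c) = true) := by
            rw [hexb, hseenb]; simp
          rcases hlk : List.lookup c lower_names with _ | name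
          · have hpred : pvPredPatA lower_names patterns exclude c = false := by
              unfold pvPredPatA; rw [hexb, hlk]; rfl
            have hstep : pvStepPat lower_names patterns exclude st c = st := by
              unfold pvStepPat
              rw [if_neg hcn, hlk]
            rw [hstep, pvPick_skip _ _ _ _ (by simp [hpred]), ih st]
          · by_cases hany : patterns.any (fun pattern => PySem.Str.isIn pattern name) = true
            · have hpred : pvPredPatA lower_names patterns exclude c = true := by
                unfold pvPredPatA
                rw [hexb, hlk]
                simp only [Option.any_some]
                rw [hany]
                rfl
              have hstep : pvStepPat lower_names patterns exclude st c =
                  (st.1 ++ [c], PySem.Set.add st.2 c) := by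
                unfold pvStepPat
                rw [if_neg hcn, hlk]
                dsimp only
                rw [if_pos hany]
              rw [hstep, pvPick_take _ _ _ _ hseen hpred, (ih _)]
              simp
            · have hany' : patterns.any (fun pattern => PySem.Str.isIn pattern name) = false :=
                Bool.eq_false_iff.mpr hany
              have hpred : pvPredPatA lower_names patterns exclude c = false := by
                unfold pvPredPatA
                rw [hexb, hlk]
                simp only [Option.any_some]
                rw [hany']
                rfl
              have hstep : pvStepPat lower_names patterns exclude st c = st := by
                unfold pvStepPat
                rw [if_neg hcn, hlk]
                dsimp only
                rw [if_neg hany]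
              rw [hstep, pvPick_skip _ _ _ _ (by simp [hpred]), ih st]

-- characterisation of B's single pass: both buckets
theorem pvB_char (role_by_name : List (String × String)) (roles patterns : List String)
    (lower_names : List (String × String)) (exclude : List String)
    (cs : List String) (st : List String × List String × PySem.Set String) :
    (cs.foldl (pvStepB role_by_name roles patterns lower_names exclude) st).1 =
      st.1 ++ pvPick (pvPredRole role_by_name roles exclude) st.2.2 cs ∧
    (cs.foldl (pvStepB role_by_name roles patterns lower_names exclude) st).2.1 =
      st.2.1 ++ pvPick (pvPredPatB role_by_name roles patterns lower_names exclude) st.2.2 cs := by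
  induction cs generalizing st with
  | nil => simp [pvPick]
  | cons c cs ih =>
      simp only [List.foldl_cons]
      by_cases hex : c ∈ exclude
      · have hexb : exclude.contains c = true := by simpa using hex
        have hpredR : pvPredRole role_by_name roles exclude c = false := by
          unfold pvPredRole; rw [hexb]; rfl
        have hpredP : pvPredPatB role_by_name roles patterns lower_names exclude c = false := by
          unfold pvPredPatB; rw [hexb]; rfl
        have hstep : pvStepB role_by_name roles patterns lower_names exclude st c = st := by
          unfold pvStepB
          rw [if_pos (show (exclude.contains c || PySem.Set.contains st.2.2 c) = true by
            rw [hexb]; rfl)]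
        rw [hstep, pvPick_skip _ _ _ _ (by simp [hpredR]),
          pvPick_skip _ _ _ _ (by simp [hpredP])]
        exact ih st
      · have hexb : exclude.contains c = false := by simpa using hex
        by_cases hseen : c ∈ st.2.2
        · have hseenb : PySem.Set.contains st.2.2 c = true := by simpa using hseen
          have hstep : pvStepB role_by_name roles patterns lower_names exclude st c = st := by
            unfold pvStepB
            rw [if_pos (show (exclude.contains c || PySem.Set.contains st.2.2 c) = true by
              rw [hseenb, Bool.or_true])]
          rw [hstep, pvPick_skip _ _ _ _ (by simp [hseen]),
            pvPick_skip _ _ _ _ (by simp [hseen])]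
          exact ih st
        · have hseenb : PySem.Set.contains st.2.2 c = false := by simpa using hseen
          have hcn : ¬((exclude.contains c || PySem.Set.contains st.2.2 c) = true) := by
            rw [hexb, hseenb]; simp
          by_cases hrole : pvRoleHit role_by_name roles c = true
          · have hpredR : pvPredRole role_by_name roles exclude c = true := by
              unfold pvPredRole; rw [hexb, hrole]; rfl
            have hpredP : pvPredPatB role_by_name roles patterns lower_names exclude c = false := by
              unfold pvPredPatB; rw [hexb, hrole]; rfl
            have hstep : pvStepB role_by_name roles patterns lower_names exclude st c =
                (st.1 ++ [c], st.2.1, PySem.Set.add st.2.2 c) := by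
              unfold pvStepB
              rw [if_neg hcn]
              dsimp only
              rw [if_pos hrole]
            rw [hstep, pvPick_take _ _ _ _ hseen hpredR,
              pvPick_skip _ _ _ _ (by simp [hpredP])]
            refine ⟨((ih _).1).trans (by simp), ((ih _).2).trans ?_⟩
            rw [pvPick_add_of_false _ cs _ c hpredP]
          · have hrole' : pvRoleHit role_by_name roles c = false :=
              Bool.eq_false_iff.mpr hrole
            have hpredR : pvPredRole role_by_name roles exclude c = false := by
              unfold pvPredRole; rw [hexb, hrole']; rfl
            by_cases hany : patterns.any (fun pattern =>
                (List.lookup c lower_names).any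
                  (fun name => PySem.Str.isIn pattern name)) = true
            · have hpredP : pvPredPatB role_by_name roles patterns lower_names exclude c
                  = true := by
                unfold pvPredPatB
                rw [hexb, hrole', hany]
                rfl
              have hstep : pvStepB role_by_name roles patterns lower_names exclude st c =
                  (st.1, st.2.1 ++ [c], PySem.Set.add st.2.2 c) := by
                unfold pvStepB
                rw [if_neg hcn]
                dsimp only
                rw [if_neg (by rw [hrole']; simp), if_pos hany]
              rw [hstep, pvPick_skip _ _ _ _ (by simp [hpredR]),
                pvPick_take _ _ _ _ hseen hpredP]
              refine ⟨((ih _).1).trans ?_, ((ih _).2).trans (by simp)⟩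
              rw [pvPick_add_of_false _ cs _ c hpredR]
            · have hany' : patterns.any (fun pattern =>
                  (List.lookup c lower_names).any
                    (fun name => PySem.Str.isIn pattern name)) = false :=
                Bool.eq_false_iff.mpr hany
              have hpredP : pvPredPatB role_by_name roles patterns lower_names exclude c
                  = false := by
                unfold pvPredPatB
                rw [hexb, hrole', hany']
                rfl
              have hstep : pvStepB role_by_name roles patterns lower_names exclude st c =
                  (st.1, st.2.1, PySem.Set.add st.2.2 c) := by
                unfold pvStepB
                rw [if_neg hcn]
                dsimp only
                rw [if_neg (by rw [hrole']; simp), if_neg hany]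
              rw [hstep, pvPick_skip _ _ _ _ (by simp [hpredR]),
                pvPick_skip _ _ _ _ (by simp [hpredP])]
              refine ⟨((ih _).1).trans ?_, ((ih _).2).trans ?_⟩
              · rw [pvPick_add_of_false _ cs _ c hpredR]
              · rw [pvPick_add_of_false _ cs _ c hpredP]

-- A's `if preferred …` block computes B's head (and its seen set)
theorem pvInit_eq (preferred : Option String) (columns exclude : List String) :
    pvInitA preferred columns exclude =
      (pvHeadB preferred columns exclude,
        PySem.Set.ofList (pvHeadB preferred columns exclude)) := by
  rcases preferred with _ | p
  · simp [pvInitA, pvHeadB, PySem.Set.ofList, PySem.Set.empty]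
  · simp [pvInitA, pvHeadB, PySem.Set.empty, PySem.Set.contains]
    split_ifs <;> simp [PySem.Set.ofList, PySem.Set.add, PySem.Set.contains]

theorem candidate_columns_agree (preferred : Option String) (columns : List String)
    (role_by_name : List (String × String)) (roles patterns : List String)
    (lower_names : List (String × String)) (exclude : List String) :
    candidate_columns_py preferred columns role_by_name roles patterns lower_names exclude =
    candidate_columns_py_alt preferred columns role_by_name roles patterns lower_names exclude := by
  simp only [candidate_columns_py, candidate_columns_py_alt]
  rw [pvInit_eq]
  obtain ⟨h1a, h1b⟩ := pvRole_char role_by_name roles exclude columns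
    (pvHeadB preferred columns exclude, PySem.Set.ofList (pvHeadB preferred columns exclude))
  obtain ⟨hBa, hBb⟩ := pvB_char role_by_name roles patterns lower_names exclude columns
    ([], [], PySem.Set.ofList (pvHeadB preferred columns exclude))
  rw [pvPat_char, h1a, hBa, hBb]
  dsimp only
  simp only [List.nil_append, List.append_assoc, List.append_right_inj]
  refine pvPick_ext _ _ columns _ _ (fun d hd => ?_)
  have hseen1 := h1b d
  dsimp only at hseen1
  have hswap : ((List.lookup d lower_names).any
        (fun name => patterns.any (fun pattern => PySem.Str.isIn pattern name))) =
      (patterns.any (fun pattern =>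
        (List.lookup d lower_names).any (fun name => PySem.Str.isIn pattern name))) := by
    rcases List.lookup d lower_names with _ | name <;> simp
  constructor
  · rintro ⟨hns, hq⟩
    rw [hseen1] at hns
    push_neg at hns
    obtain ⟨hh, hrest⟩ := hns
    have hq' := hq
    unfold pvPredPatA at hq'
    simp only [Bool.and_eq_true, Bool.not_eq_true'] at hq'
    obtain ⟨hexd, hany⟩ := hq'
    have hnr : pvRoleHit role_by_name roles d = false := by
      have hrf : pvPredRole role_by_name roles exclude d = false :=
        Bool.eq_false_iff.mpr (hrest hd)
      unfold pvPredRole at hrf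
      rw [hexd] at hrf
      simpa using hrf
    refine ⟨hh, ?_⟩
    unfold pvPredPatB
    rw [hexd, hnr, ← hswap, hany]
    rfl
  · rintro ⟨hh, hq⟩
    have hq' := hq
    unfold pvPredPatB at hq'
    simp only [Bool.and_eq_true, Bool.not_eq_true'] at hq'
    obtain ⟨⟨hexd, hnr⟩, hany⟩ := hq'
    constructor
    · rw [hseen1]
      push_neg
      refine ⟨hh, fun _ => ?_⟩
      unfold pvPredRole
      rw [hexd, hnr]
      simp
    · unfold pvPredPatA
      rw [hexd, hswap, hany]
      rfl

-- ===== VERDICT (by name: the statement is the Claim_ definition above) =====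
theorem candidate_columns_py_spec : Claim_equal_candidate_columns_py := by
  intro preferred columns role_by_name roles patterns lower_names exclude _ _
  unfold Spec_candidate_columns_py
  exact candidate_columns_agree preferred columns role_by_name roles patterns lower_names exclude
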